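-- pv_equiv track=rewrite | github.com/Vaidehithakur/Hackerrank | FunnyString.py | calculate_ascii_difference
-- ===== SOURCE A (Python) =====
-- def calculate_ascii_difference(s):
--     temp=0
--     actual_list=[]
--     for i in s:
--         if temp!=0:
--             actual_list.append(abs(ord(i)-temp))
--         temp=ord(i)
--     return actual_list
-- ===== SOURCE B (Python) =====
-- def calculate_ascii_difference(s):
--     # Divide and conquer: split the character list at the midpoint (sharing the
--     # boundary character), solve each half recursively, concatenate the results.
--     def go(chars):
--         n = len(chars)
--         if n < 2:
--             return []
--         if n == 2:
--             return [abs(ord(chars[0]) - ord(chars[1]))]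
--         mid = n // 2
--         return go(chars[:mid + 1]) + go(chars[mid:])
--     return go(list(s))
-- ===== Notes on version B (the rewrite author's own statement) =====
-- stated objective: alternative
-- what changed: Replaced A's iterative single pass with a sentinel-initialized previous-ordinal accumulator by a divide-and-conquer recursion that splits the character list at the midpoint (sharing the boundary character), solves both halves and concatenates.
import Mathlib
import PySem

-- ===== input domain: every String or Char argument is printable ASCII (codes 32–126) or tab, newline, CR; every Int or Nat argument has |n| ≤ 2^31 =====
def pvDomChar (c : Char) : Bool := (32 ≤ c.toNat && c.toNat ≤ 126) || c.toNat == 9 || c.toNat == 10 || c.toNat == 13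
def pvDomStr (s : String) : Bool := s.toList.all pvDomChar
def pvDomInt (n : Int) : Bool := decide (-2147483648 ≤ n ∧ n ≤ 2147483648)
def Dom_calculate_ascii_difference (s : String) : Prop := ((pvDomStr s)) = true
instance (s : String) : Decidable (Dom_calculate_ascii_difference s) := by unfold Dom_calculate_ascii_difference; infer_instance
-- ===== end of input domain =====

-- B replaces A's stateful sentinel-initialized loop by a midpoint divide-and-conquer recursion (alternative algorithm, same results).

-- ===== PORT A =====
-- one stateful pass: temp holds the previous ord (0 before the first char)
def calculate_ascii_difference (s : String) : List Int :=
  (s.toList.foldl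
    (fun (st : Int × List Int) (i : Char) =>
      ((i.toNat : Int),
        if st.1 ≠ 0 then st.2 ++ [|(i.toNat : Int) - st.1|] else st.2))
    (0, [])).2

-- ===== PORT B =====
-- divide and conquer: fewer than 2 chars → []; exactly 2 → the one difference;
-- otherwise split at mid = n // 2 sharing the boundary char and concatenate.
-- (structural recursion on a fuel = length + 1, proved sufficient below)
def pvGoAlt : Nat → List Char → List Int
  | 0, _ => []
  | f + 1, chars =>
    if chars.length < 2 then []
    else if chars.length = 2 then
      [|((chars[0]!).toNat : Int) - ((chars[1]!).toNat : Int)|]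
    else
      let mid := chars.length / 2
      pvGoAlt f (chars.take (mid + 1)) ++ pvGoAlt f (chars.drop mid)

def calculate_ascii_difference_alt (s : String) : List Int :=
  pvGoAlt (s.toList.length + 1) s.toList

-- ===== PRECONDITION & SPEC =====
def Spec_calculate_ascii_difference (s : String) (out : List Int) : Prop := out = calculate_ascii_difference_alt s
instance (s : String) (out : List Int) : Decidable (Spec_calculate_ascii_difference s out) := by unfold Spec_calculate_ascii_difference; infer_instance

-- ===== CLAIM (what is proved, stated in full; the proofs are below) =====
def Claim_equal_calculate_ascii_difference : Prop := ∀ (s : String), Dom_calculate_ascii_difference s → Spec_calculate_ascii_difference s (calculate_ascii_difference s)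

-- ===== LEMMAS AND PROOFS =====

-- reference pairwise-difference list, used only in the proofs
def pvPd : List Char → List Int
  | a :: b :: rest => |(a.toNat : Int) - (b.toNat : Int)| :: pvPd (b :: rest)
  | _ => []

theorem pvPd_append (l1 : List Char) (m : Char) (l2 : List Char) :
    pvPd (l1 ++ [m]) ++ pvPd (m :: l2) = pvPd (l1 ++ m :: l2) := by
  induction l1 with
  | nil => simp [pvPd]
  | cons a t ih =>
    cases t with
    | nil => simp [pvPd]
    | cons b t' => simpa [pvPd] using ih

theorem pvGoAlt_eq_pvPd (f : Nat) (l : List Char) (hf : l.length < f) :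
    pvGoAlt f l = pvPd l := by
  induction f generalizing l with
  | zero => omega
  | succ f ih =>
    rw [pvGoAlt]
    by_cases h1 : l.length < 2
    · rw [if_pos h1]
      match l, h1 with
      | [], _ => rfl
      | [_], _ => rfl
    · rw [if_neg h1]
      by_cases h2 : l.length = 2
      · rw [if_pos h2]
        match l, h2 with
        | [a, b], _ => simp [pvPd]
      · rw [if_neg h2]
        show pvGoAlt f (l.take (l.length / 2 + 1)) ++ pvGoAlt f (l.drop (l.length / 2)) = pvPd l
        have hm : l.length / 2 < l.length := by omega
        rw [ih (l.take (l.length / 2 + 1)) (by simp [List.length_take]; omega),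
            ih (l.drop (l.length / 2)) (by simp [List.length_drop]; omega)]
        have hdrop : l.drop (l.length / 2) = l[l.length / 2] :: l.drop (l.length / 2 + 1) :=
          List.drop_eq_getElem_cons hm
        have htake : l.take (l.length / 2 + 1) = l.take (l.length / 2) ++ [l[l.length / 2]] := by
          rw [List.take_add_one]
          simp [List.getElem?_eq_getElem hm]
        rw [htake, hdrop, pvPd_append]
        rw [show l.take (l.length / 2) ++ l[l.length / 2] :: l.drop (l.length / 2 + 1)
              = l.take (l.length / 2 + 1) ++ l.drop (l.length / 2 + 1) from by
            rw [htake]; simp]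
        rw [List.take_append_drop]

theorem domChar_ord_ne_zero (c : Char) (h : pvDomChar c = true) : (c.toNat : Int) ≠ 0 := by
  simp [pvDomChar] at h
  omega

-- loop invariant: starting from a nonzero previous ordinal ord p, A's fold appends
-- exactly the pairwise differences of p :: l
theorem loopA_eq (l : List Char) (hl : ∀ c ∈ l, pvDomChar c = true)
    (p : Char) (hp : (p.toNat : Int) ≠ 0) (acc : List Int) :
    (l.foldl
      (fun (st : Int × List Int) (i : Char) =>
        ((i.toNat : Int),
          if st.1 ≠ 0 then st.2 ++ [|(i.toNat : Int) - st.1|] else st.2))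
      ((p.toNat : Int), acc)).2
    = acc ++ pvPd (p :: l) := by
  induction l generalizing p acc with
  | nil => simp [pvPd]
  | cons c rest ih =>
    have hc : (c.toNat : Int) ≠ 0 := domChar_ord_ne_zero c (hl c (by simp))
    simp only [List.foldl_cons, if_pos hp]
    rw [ih (fun x hx => hl x (by simp [hx])) c hc]
    simp [pvPd, abs_sub_comm]

theorem calculate_ascii_difference_eq (s : String)
    (h : Dom_calculate_ascii_difference s) :
    calculate_ascii_difference s = calculate_ascii_difference_alt s := by
  unfold calculate_ascii_difference calculate_ascii_difference_alt
  rw [pvGoAlt_eq_pvPd _ _ (by omega)]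
  unfold Dom_calculate_ascii_difference pvDomStr at h
  rw [List.all_eq_true] at h
  cases hs : s.toList with
  | nil => simp [pvPd]
  | cons c rest =>
    have hrest : ∀ x ∈ rest, pvDomChar x = true := fun x hx => h x (by simp [hs, hx])
    have hc : (c.toNat : Int) ≠ 0 := domChar_ord_ne_zero c (h c (by simp [hs]))
    rw [List.foldl_cons]
    simp only []
    rw [show (if ((0:Int) ≠ 0) then ([] : List Int) ++ [|(c.toNat : Int) - (0:Int)|] else ([] : List Int)) = [] from by norm_num]
    exact loopA_eq rest hrest c hc []

-- ===== VERDICT (by name: the statement is the Claim_ definition above) =====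
theorem calculate_ascii_difference_spec : Claim_equal_calculate_ascii_difference := by
  intro s h
  exact calculate_ascii_difference_eq s h
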